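-- pv_equiv track=rewrite | github.com/urchade/ATG | layers/structure.py | create_position_code_sep
-- ===== SOURCE A (Python) =====
-- def create_position_code_sep(seq_graph, sep_token="stop_entity"):
--     # seq_graph: list of tokens
--     # return: list of codes
--     # codes: 0: entity, 1: head entity, 2: tail entity, 3: relation
--     generating_entities = True
--     relation_step = 0
--     codes = []
--     for node in seq_graph:
--         if generating_entities:
--             codes.append(4)
--         else:
--             if relation_step % 3 == 0:
--                 codes.append(1)
--             elif relation_step % 3 == 1:
--                 codes.append(2)
--             else:
--                 codes.append(3)
--             relation_step += 1
--         if node == sep_token: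
--             generating_entities = False
--     # add start code
--     codes = [0] + codes
--     return codes
-- ===== SOURCE B (Python) =====
-- def create_position_code_sep(seq_graph, sep_token="stop_entity"):
--     # boundary: everything up to and including the first sep_token gets code 4
--     try:
--         split = seq_graph.index(sep_token) + 1
--     except ValueError:
--         split = len(seq_graph)
--     return [0] + [4] * split + [1 + i % 3 for i in range(len(seq_graph) - split)]
-- ===== Notes on version B (the rewrite author's own statement) =====
-- stated objective: simpler
-- what changed: Replaced the stateful loop (generating_entities flag + relation_step counter) by precomputing the split index with list.index and building the result as [0] + [4]*split + a 1+i%3 comprehension.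
import Mathlib
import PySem

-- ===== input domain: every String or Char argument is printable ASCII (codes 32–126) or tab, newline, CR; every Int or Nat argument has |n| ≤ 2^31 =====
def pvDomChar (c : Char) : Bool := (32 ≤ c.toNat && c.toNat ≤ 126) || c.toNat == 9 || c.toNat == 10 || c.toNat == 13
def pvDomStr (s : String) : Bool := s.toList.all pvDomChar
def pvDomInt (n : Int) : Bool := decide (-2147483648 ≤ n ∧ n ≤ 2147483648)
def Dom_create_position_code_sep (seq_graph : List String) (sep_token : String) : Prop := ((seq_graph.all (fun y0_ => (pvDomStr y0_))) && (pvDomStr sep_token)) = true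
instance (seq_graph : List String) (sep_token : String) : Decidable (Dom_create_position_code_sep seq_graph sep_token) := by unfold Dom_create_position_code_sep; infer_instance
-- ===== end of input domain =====

-- B replaces A's stateful flag/counter loop by a precomputed split index plus segment
-- concatenation; objective: simpler (same O(n) cost).

-- ===== PORT A =====
-- the for-loop of A: state (generating_entities, relation_step), one code emitted per node
def pvLoopA (sep_token : String) : List String → Bool → Int → List Int
  | [], _, _ => []
  | node :: rest, g, r =>
    if g then
      4 :: pvLoopA sep_token rest (if node == sep_token then false else g) r
    else
      (if PySem.Int.mod r 3 == 0 then (1 : Int)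
       else if PySem.Int.mod r 3 == 1 then 2 else 3) ::
        pvLoopA sep_token rest (if node == sep_token then false else g) (r + 1)

def create_position_code_sep (seq_graph : List String) (sep_token : String) : List Int :=
  (0 : Int) :: pvLoopA sep_token seq_graph true 0

-- ===== PORT B =====
def create_position_code_sep_alt (seq_graph : List String) (sep_token : String) : List Int :=
  let split : Nat :=
    match PySem.List.index? seq_graph sep_token with
    | some i => i + 1
    | none => seq_graph.length
  [(0 : Int)] ++ List.replicate split 4 ++
    (PySem.List.pyRange 0 ((seq_graph.length : Int) - (split : Int)) 1).map
      (fun i => 1 + PySem.Int.mod i 3)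

-- ===== PRECONDITION & SPEC =====
def Spec_create_position_code_sep (seq_graph : List String) (sep_token : String) (out : List Int) : Prop := out = create_position_code_sep_alt seq_graph sep_token
instance (seq_graph : List String) (sep_token : String) (out : List Int) : Decidable (Spec_create_position_code_sep seq_graph sep_token out) := by unfold Spec_create_position_code_sep; infer_instance

-- ===== CLAIM (what is proved, stated in full; the proofs are below) =====
def Claim_equal_create_position_code_sep : Prop := ∀ (seq_graph : List String) (sep_token : String), Dom_create_position_code_sep seq_graph sep_token → Spec_create_position_code_sep seq_graph sep_token (create_position_code_sep seq_graph sep_token)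

-- ===== LEMMAS AND PROOFS =====

-- after the sep token the loop emits 1 + r % 3 for r = r0, r0+1, …
lemma pvLoopA_false (sep_token : String) (l : List String) :
    ∀ r : Int, 0 ≤ r →
      pvLoopA sep_token l false r
        = (PySem.List.pyRange r (r + l.length) 1).map (fun i => 1 + PySem.Int.mod i 3) := by
  induction l with
  | nil =>
    intro r _
    simp [pvLoopA, PySem.List.pyRange_one_eq_nil (le_refl r)]
  | cons node rest ih =>
    intro r hr
    have hlt : r < r + ((node :: rest).length : Int) := by simp only [List.length_cons]; push_cast; omega
    rw [PySem.List.pyRange_one_cons hlt]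
    have harith : r + 1 + (rest.length : Int) = r + ((node :: rest).length : Int) := by
      simp only [List.length_cons]; push_cast; omega
    have hrec := ih (r + 1) (by omega)
    rw [harith] at hrec
    have hmod : (if PySem.Int.mod r 3 == 0 then (1 : Int)
        else if PySem.Int.mod r 3 == 1 then 2 else 3) = 1 + PySem.Int.mod r 3 := by
      have h0 : (0:Int) ≤ PySem.Int.mod r 3 := PySem.Int.mod_nonneg _ (by omega)
      have h3 : PySem.Int.mod r 3 < 3 := PySem.Int.mod_lt _ (by omega)
      rcases (by omega : PySem.Int.mod r 3 = 0 ∨ PySem.Int.mod r 3 = 1 ∨ PySem.Int.mod r 3 = 2) with h | h | h <;>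
        rw [h] <;> decide
    unfold pvLoopA
    rw [if_neg (by simp), hmod]
    simp only [ite_self]
    rw [hrec, List.map_cons]

-- the split index B computes
def pvSplit (seq_graph : List String) (sep_token : String) : Nat :=
  match PySem.List.index? seq_graph sep_token with
  | some i => i + 1
  | none => seq_graph.length

lemma pvLoopA_true (sep_token : String) (l : List String) :
    pvLoopA sep_token l true 0
      = List.replicate (pvSplit l sep_token) 4 ++
        (PySem.List.pyRange 0 ((l.length : Int) - (pvSplit l sep_token : Int)) 1).map
          (fun i => 1 + PySem.Int.mod i 3) := by
  induction l with
  | nil => simp [pvLoopA, pvSplit, PySem.List.index?, PySem.List.pyRange_one_eq_nil (le_refl (0:Int))]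
  | cons node rest ih =>
    by_cases h : node = sep_token
    · subst h
      have hidx : PySem.List.index? (node :: rest) node = some 0 :=
        PySem.List.index?_cons_self ..
      have hs : pvSplit (node :: rest) node = 1 := by
        unfold pvSplit; rw [hidx]
      unfold pvLoopA
      rw [if_pos (by simp),
        show (if (node == node) = true then false else true) = false from by simp,
        pvLoopA_false node rest 0 le_rfl, hs]
      have hl : ((node :: rest).length : Int) - ((1:Nat) : Int) = 0 + (rest.length : Int) := by
        simp
      rw [hl]
      simp [List.replicate]
    · have hne : (node == sep_token) = false := by simp [h]
      have hidx : PySem.List.index? (node :: rest) sep_token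
          = (PySem.List.index? rest sep_token).map (· + 1) :=
        PySem.List.index?_cons_of_ne rest h
      have hsplit : pvSplit (node :: rest) sep_token = pvSplit rest sep_token + 1 := by
        unfold pvSplit; rw [hidx]
        cases PySem.List.index? rest sep_token <;> simp
      have hlen : ((node :: rest).length : Int) - ((pvSplit rest sep_token + 1 : Nat) : Int)
          = (rest.length : Int) - (pvSplit rest sep_token : Int) := by
        simp only [List.length_cons]; push_cast; omega
      unfold pvLoopA
      rw [if_pos rfl,
        show (if (node == sep_token) = true then false else true) = true from by simp [h],
        ih, hsplit, hlen, List.replicate_succ, List.cons_append]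

-- ===== VERDICT (by name: the statement is the Claim_ definition above) =====
theorem create_position_code_sep_spec : Claim_equal_create_position_code_sep := by
  intro seq_graph sep_token _
  show _ = _
  simp only [create_position_code_sep, create_position_code_sep_alt]
  rw [pvLoopA_true]
  rfl
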